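-- pv_equiv track=rewrite | github.com/boyam01/four-distance-rational-study | research/four_distance/slope_tools.py | generate_pythagorean_adjacency
-- ===== SOURCE A (Python) =====
-- import math
--
-- def generate_pythagorean_adjacency(limit: int) -> dict[int, set[int]]:
--     """Generate all legs a,b<=limit for integer right triangles."""
--     adjacency: dict[int, set[int]] = {}
--     max_m = math.isqrt(2 * limit) + 2
--     for m in range(2, max_m + 1):
--         for n in range(1, m):
--             if ((m - n) & 1) == 0 or math.gcd(m, n) != 1:
--                 continue
--             a = m * m - n * n
--             b = 2 * m * n
--             high = max(a, b)
--             if high > limit: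
--                 continue
--             for k in range(1, limit // high + 1):
--                 x = k * a
--                 y = k * b
--                 adjacency.setdefault(x, set()).add(y)
--                 adjacency.setdefault(y, set()).add(x)
--     return adjacency
-- ===== SOURCE B (Python) =====
-- import math
--
-- def generate_pythagorean_adjacency(limit: int) -> dict[int, set[int]]:
--     """Generate all legs a,b<=limit for integer right triangles."""
--     max_m = math.isqrt(2 * limit) + 2
--     # All coprime opposite-parity pairs (m, n) with 1 <= n < m <= max_m come
--     # from the Barning-Hall ternary tree rooted at (2, 1); m strictly grows
--     # toward the children, so pruning at max_m is exhaustive.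
--     pairs = []
--     stack = [(2, 1)]
--     while stack:
--         m, n = stack.pop()
--         if m > max_m:
--             continue
--         pairs.append((m, n))
--         stack.append((m + 2 * n, n))
--         stack.append((2 * m + n, m))
--         stack.append((2 * m - n, m))
--     adjacency: dict[int, set[int]] = {}
--     grow = adjacency.setdefault
--     for m, n in sorted(set(pairs)):
--         a = m * m - n * n
--         b = 2 * m * n
--         for k in range(1, limit // max(a, b) + 1):
--             grow(k * a, set()).add(k * b)
--             grow(k * b, set()).add(k * a)
--     return adjacency
-- ===== Notes on version B (the rewrite author's own statement) =====
-- stated objective: alternative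
-- what changed: Replaces the double-loop parity/gcd filter over (m, n) by a stack-driven traversal of the Barning-Hall ternary tree of coprime leg-parameter pairs rooted at (2,1), pruned at max_m and sorted into canonical order before scaling, so no gcd or parity test is ever evaluated.
import Mathlib
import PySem

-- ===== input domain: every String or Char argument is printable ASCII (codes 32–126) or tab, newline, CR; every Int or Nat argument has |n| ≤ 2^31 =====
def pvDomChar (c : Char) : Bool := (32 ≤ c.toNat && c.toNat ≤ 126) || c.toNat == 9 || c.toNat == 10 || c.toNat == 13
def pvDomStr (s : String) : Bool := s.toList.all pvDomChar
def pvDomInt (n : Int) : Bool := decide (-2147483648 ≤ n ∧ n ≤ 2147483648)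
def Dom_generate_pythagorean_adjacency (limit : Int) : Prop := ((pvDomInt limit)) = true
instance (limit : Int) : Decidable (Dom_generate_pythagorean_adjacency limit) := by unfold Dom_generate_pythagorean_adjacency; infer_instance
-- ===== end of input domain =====

-- B replaces A's double loop with parity/gcd filtering by a stack-driven traversal of the
-- Barning–Hall ternary tree of coprime leg-parameter pairs rooted at (2,1), pruned at max_m
-- (m grows strictly toward the children) and sorted into canonical order before scaling;
-- no gcd or parity test is evaluated; objective: alternative algorithm, same cost.

-- ===== PORT A =====
-- math.isqrt(2*limit) is ported as Nat.sqrt of (2*limit).toNat: exact for limit ≥ 0 (Pre_);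
-- Python raises ValueError for limit < 0, excluded by Pre_.
def generate_pythagorean_adjacency (limit : Int) : List (Int × List Int) :=
  let max_m : Int := ((2 * limit).toNat.sqrt : Int) + 2
  ((PySem.List.pyRange 2 (max_m + 1) 1).foldl (fun adj m =>
    (PySem.List.pyRange 1 m 1).foldl (fun adj n =>
      if PySem.Int.band (m - n) 1 = 0 ∨ Int.gcd m n ≠ 1 then adj
      else
        let a := m * m - n * n
        let b := 2 * m * n
        let high := max a b
        if high > limit then adj
        else
          (PySem.List.pyRange 1 (PySem.Int.floordiv limit high + 1) 1).foldl (fun adj k =>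
            let x := k * a
            let y := k * b
            ((adj.modify x [] (fun s => PySem.Set.add s y)).modify y
              [] (fun s => PySem.Set.add s x))) adj) adj)
    (PySem.Dict.empty : PySem.Dict Int (List Int))).items

-- ===== PORT B =====
-- the while-loop over the explicit stack (LIFO: last pushed child is processed first, depth
-- first) is ported as the equivalent structural recursion, with fuel only to make it total:
-- every kept node has m ≤ max_m and the children's m grows, so fuel (max_m+2).toNat never runs out
def pvCollect (M : Int) : Nat → Int → Int → List (Int × Int)
  | 0, _, _ => []
  | fuel + 1, m, n =>
    if m > M then []
    else (m, n) :: (pvCollect M fuel (2 * m - n) m ++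
                    pvCollect M fuel (2 * m + n) m ++
                    pvCollect M fuel (m + 2 * n) n)

def generate_pythagorean_adjacency_alt (limit : Int) : List (Int × List Int) :=
  let max_m : Int := ((2 * limit).toNat.sqrt : Int) + 2
  let pairs := pvCollect max_m (max_m + 2).toNat 2 1
  -- sorted(set(pairs)): Python's tuple sort is lexicographic → sorted2 with fst/snd keys
  ((PySem.List.sorted2 (PySem.Set.ofList pairs) Prod.fst Prod.snd).foldl (fun adj p =>
      let a := p.1 * p.1 - p.2 * p.2
      let b := 2 * p.1 * p.2
      (PySem.List.pyRange 1 (PySem.Int.floordiv limit (max a b) + 1) 1).foldl (fun adj k =>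
        ((adj.modify (k * a) [] (fun s => PySem.Set.add s (k * b))).modify (k * b)
          [] (fun s => PySem.Set.add s (k * a)))) adj)
    (PySem.Dict.empty : PySem.Dict Int (List Int))).items

-- ===== PRECONDITION & SPEC =====
-- Pre_ excludes limit < 0, where Python's math.isqrt(2*limit) raises ValueError (in both A and B).
def Pre_generate_pythagorean_adjacency (limit : Int) : Prop := 0 ≤ limit
instance (limit : Int) : Decidable (Pre_generate_pythagorean_adjacency limit) := by unfold Pre_generate_pythagorean_adjacency; infer_instance
def pvWitness_generate_pythagorean_adjacency : Int := 30

def Spec_generate_pythagorean_adjacency (limit : Int) (out : List (Int × List Int)) : Prop := out = generate_pythagorean_adjacency_alt limit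
instance (limit : Int) (out : List (Int × List Int)) : Decidable (Spec_generate_pythagorean_adjacency limit out) := by unfold Spec_generate_pythagorean_adjacency; infer_instance

-- ===== CLAIM (what is proved, stated in full; the proofs are below) =====
def Claim_equal_generate_pythagorean_adjacency : Prop := ∀ (limit : Int), Dom_generate_pythagorean_adjacency limit → Pre_generate_pythagorean_adjacency limit → Spec_generate_pythagorean_adjacency limit (generate_pythagorean_adjacency limit)

-- ===== LEMMAS AND PROOFS =====

-- the pairs A's filter keeps: valid Euclid parameters (opposite parity, coprime, 1 ≤ n < m)
def pvValid (m n : Int) : Prop :=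
  2 ≤ m ∧ 1 ≤ n ∧ n < m ∧ (m - n) % 2 = 1 ∧ Int.gcd m n = 1

-- A's traversal order of the kept (m, n) pairs, as a list
def pvLA (M : Int) : List (Int × Int) :=
  (PySem.List.pyRange 2 (M + 1) 1).flatMap (fun m =>
    ((PySem.List.pyRange 1 m 1).filter
        (fun n => decide ¬ (PySem.Int.band (m - n) 1 = 0 ∨ Int.gcd m n ≠ 1))).map
      (fun n => (m, n)))

-- c is one of the three Barning–Hall children of q
def pvChild (q c : Int × Int) : Prop :=
  c = (2 * q.1 - q.2, q.1) ∨ c = (2 * q.1 + q.2, q.1) ∨ c = (q.1 + 2 * q.2, q.2)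

-- the unique Barning–Hall parent of a valid non-root pair
def pvParent (p : Int × Int) : Int × Int :=
  if 3 * p.2 < p.1 then (p.1 - 2 * p.2, p.2)
  else if 2 * p.2 < p.1 then (p.2, p.1 - 2 * p.2)
  else (p.2, 2 * p.2 - p.1)

-- skipping guard inside a fold = folding over the filtered list
theorem pv_foldl_skip {α β : Type} (p : α → Prop) [DecidablePred p] (f : β → α → β)
    (l : List α) (init : β) :
    l.foldl (fun acc x => if p x then acc else f acc x) init
      = (l.filter (fun x => decide ¬ p x)).foldl f init := by
  rw [List.foldl_filter]
  apply PySem.List.foldl_congr_mem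
  intro acc x _
  by_cases h : p x <;> simp [h]

-- A's filter test, stated arithmetically
theorem pv_band_iff (m n : Int) :
    (¬ (PySem.Int.band (m - n) 1 = 0 ∨ Int.gcd m n ≠ 1))
      ↔ ((m - n) % 2 = 1 ∧ Int.gcd m n = 1) := by
  have hb : PySem.Int.band (m - n) 1 = (m - n) % 2 := by
    rw [PySem.Int.band_one, PySem.Int.mod_eq_emod_of_pos (by norm_num)]
  rw [not_or, not_ne_iff, hb]
  constructor
  · rintro ⟨h1, h2⟩; exact ⟨by omega, h2⟩
  · rintro ⟨h1, h2⟩; exact ⟨by omega, h2⟩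

theorem pv_mem_LA (M : Int) (x : Int × Int) :
    x ∈ pvLA M ↔ pvValid x.1 x.2 ∧ x.1 ≤ M := by
  obtain ⟨xm, xn⟩ := x
  simp only [pvLA, List.mem_flatMap, List.mem_map, List.mem_filter,
    PySem.List.mem_pyRange_one, decide_eq_true_eq, pvValid]
  constructor
  · rintro ⟨m, hm, n, ⟨hn, hf⟩, he⟩
    rw [Prod.mk.injEq] at he
    obtain ⟨rfl, rfl⟩ := he
    have := (pv_band_iff m n).mp hf
    exact ⟨⟨by omega, by omega, by omega, this.1, this.2⟩, by omega⟩
  · rintro ⟨⟨h2, h1, hlt, hpar, hgcd⟩, hM⟩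
    exact ⟨xm, ⟨by omega, by omega⟩, xn, ⟨⟨by omega, hlt⟩,
      (pv_band_iff xm xn).mpr ⟨hpar, hgcd⟩⟩, rfl⟩

theorem pv_pairwise_LA (M : Int) :
    (pvLA M).Pairwise (fun p q => toLex p < toLex q) := by
  unfold pvLA
  rw [List.pairwise_flatMap]
  constructor
  · intro m _
    rw [List.pairwise_map]
    refine List.Pairwise.filter _ (List.Pairwise.imp ?_ (PySem.List.pairwise_lt_pyRange_one 1 m))
    intro a b h
    exact Prod.Lex.toLex_lt_toLex.mpr (Or.inr ⟨rfl, h⟩)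
  · refine (PySem.List.pairwise_lt_pyRange_one 2 (M + 1)).imp ?_
    intro m1 m2 h12 x hx y hy
    simp only [List.mem_map] at hx hy
    obtain ⟨n1, -, rfl⟩ := hx
    obtain ⟨n2, -, rfl⟩ := hy
    exact Prod.Lex.toLex_lt_toLex.mpr (Or.inl h12)

theorem pv_nodup_LA (M : Int) : (pvLA M).Nodup :=
  (pv_pairwise_LA M).imp (fun h => by rintro rfl; exact lt_irrefl _ h)

-- children of a valid pair are valid
theorem pv_child_valid {m n : Int} (h : pvValid m n) :
    pvValid (2 * m - n) m ∧ pvValid (2 * m + n) m ∧ pvValid (m + 2 * n) n := by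
  obtain ⟨h2, h1, hlt, hpar, hgcd⟩ := h
  have g1 : Int.gcd (2 * m - n) m = Int.gcd m n := by
    have e : 2 * m - n = -n + 2 * m := by ring
    rw [e, Int.gcd_add_mul_right_left, Int.neg_gcd, Int.gcd_comm]
  have g2 : Int.gcd (2 * m + n) m = Int.gcd m n := by
    have e : 2 * m + n = n + 2 * m := by ring
    rw [e, Int.gcd_add_mul_right_left, Int.gcd_comm]
  have g3 : Int.gcd (m + 2 * n) n = Int.gcd m n := by
    rw [Int.gcd_add_mul_right_left]
  refine ⟨⟨by omega, by omega, by omega, by omega, by rw [g1]; exact hgcd⟩,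
          ⟨by omega, by omega, by omega, by omega, by rw [g2]; exact hgcd⟩,
          ⟨by omega, by omega, by omega, by omega, by rw [g3]; exact hgcd⟩⟩

theorem pv_collect_sound (M : Int) :
    ∀ (fuel : Nat) (m n : Int), pvValid m n →
      ∀ p ∈ pvCollect M fuel m n, pvValid p.1 p.2 ∧ p.1 ≤ M := by
  intro fuel
  induction fuel with
  | zero => intro m n _ p hp; simp [pvCollect] at hp
  | succ fuel ih =>
    intro m n hv p hp
    rw [pvCollect] at hp
    by_cases hm : m > M
    · simp [hm] at hp
    · rw [if_neg hm, List.mem_cons, List.mem_append, List.mem_append] at hp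
      obtain ⟨hc1, hc2, hc3⟩ := pv_child_valid hv
      rcases hp with rfl | (h | h) | h
      · exact ⟨hv, by omega⟩
      · exact ih _ _ hc1 p h
      · exact ih _ _ hc2 p h
      · exact ih _ _ hc3 p h

theorem pv_head_mem (M : Int) {fuel : Nat} {m n : Int} (hf : 1 ≤ fuel) (hm : m ≤ M) :
    (m, n) ∈ pvCollect M fuel m n := by
  obtain ⟨fuel, rfl⟩ : ∃ f, fuel = f + 1 := ⟨fuel - 1, by omega⟩
  rw [pvCollect, if_neg (by omega)]
  exact List.mem_cons_self

-- a child of any node of the pruned tree with small enough first component is in the tree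
theorem pv_child_mem (M : Int) :
    ∀ (fuel : Nat) (m n : Int), 1 ≤ n → n < m → (M + 2 - m).toNat ≤ fuel →
      ∀ q c, q ∈ pvCollect M fuel m n → pvChild q c → c.1 ≤ M →
        c ∈ pvCollect M fuel m n := by
  intro fuel
  induction fuel with
  | zero => intro m n _ _ _ q c hq; simp [pvCollect] at hq
  | succ fuel ih =>
    intro m n hn hnm hfuel q c hq hc hcM
    rw [pvCollect] at hq ⊢
    by_cases hm : m > M
    · simp [hm] at hq
    · rw [if_neg hm] at hq ⊢
      rw [List.mem_cons, List.mem_append, List.mem_append] at hq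
      have hf1 : 1 ≤ fuel := by omega
      rcases hq with rfl | (h | h) | h
      · -- q is the node itself: c is one of the three children, each heads its subtree
        simp only [pvChild] at hc
        rcases hc with rfl | rfl | rfl
        · exact List.mem_cons_of_mem _ (List.mem_append_left _
            (List.mem_append_left _ (pv_head_mem M hf1 hcM)))
        · exact List.mem_cons_of_mem _ (List.mem_append_left _
            (List.mem_append_right _ (pv_head_mem M hf1 hcM)))
        · exact List.mem_cons_of_mem _ (List.mem_append_right _ (pv_head_mem M hf1 hcM))
      · exact List.mem_cons_of_mem _ (List.mem_append_left _ (List.mem_append_left _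
          (ih (2 * m - n) m (by omega) (by omega) (by omega) q c h hc hcM)))
      · exact List.mem_cons_of_mem _ (List.mem_append_left _ (List.mem_append_right _
          (ih (2 * m + n) m (by omega) (by omega) (by omega) q c h hc hcM)))
      · exact List.mem_cons_of_mem _ (List.mem_append_right _
          (ih (m + 2 * n) n (by omega) (by omega) (by omega) q c h hc hcM))

-- gcd of a multiple: used to rule out the boundary cases m = 2n, m = 3n
theorem pv_gcd_mul (k n : Int) : Int.gcd (k * n) n = n.natAbs := by
  have e : k * n = 0 + k * n := by ring
  rw [e, Int.gcd_add_mul_right_left]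
  simp [Int.gcd]

-- every valid non-root pair is a child of its valid parent, whose first component is smaller
theorem pv_parent_spec {m n : Int} (h : pvValid m n) (hroot : (m, n) ≠ (2, 1)) :
    pvValid (pvParent (m, n)).1 (pvParent (m, n)).2 ∧
      (pvParent (m, n)).1 < m ∧ pvChild (pvParent (m, n)) (m, n) := by
  obtain ⟨h2, h1, hlt, hpar, hgcd⟩ := h
  have hne3 : m ≠ 3 * n := by
    intro e
    have : Int.gcd m n = n.natAbs := by rw [e, pv_gcd_mul]
    have hn1 : n = 1 := by omega
    omega
  have hne2 : m ≠ 2 * n := by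
    intro e
    have : Int.gcd m n = n.natAbs := by rw [e, pv_gcd_mul]
    have hn1 : n = 1 := by omega
    have hm2 : m = 2 := by omega
    exact hroot (by rw [hm2, hn1])
  unfold pvParent
  simp only
  by_cases hc1 : 3 * n < m
  · rw [if_pos hc1]
    refine ⟨⟨by omega, by omega, by omega, by omega, ?_⟩, by omega, ?_⟩
    · have e : m - 2 * n = m + (-2) * n := by ring
      rw [e, Int.gcd_add_mul_right_left]; exact hgcd
    · unfold pvChild; right; right
      show (m, n) = (m - 2 * n + 2 * n, n)
      rw [Prod.mk.injEq]; exact ⟨by ring, rfl⟩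
  · rw [if_neg hc1]
    by_cases hc2 : 2 * n < m
    · rw [if_pos hc2]
      refine ⟨⟨by omega, by omega, by omega, by omega, ?_⟩, by omega, ?_⟩
      · have e : m - 2 * n = m + (-2) * n := by ring
        rw [Int.gcd_comm, e, Int.gcd_add_mul_right_left]
        exact hgcd
      · unfold pvChild; right; left
        show (m, n) = (2 * n + (m - 2 * n), n)
        rw [Prod.mk.injEq]; exact ⟨by ring, rfl⟩
    · rw [if_neg hc2]
      refine ⟨⟨by omega, by omega, by omega, by omega, ?_⟩, by omega, ?_⟩
      · have e : 2 * n - m = -m + 2 * n := by ring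
        rw [Int.gcd_comm, e, Int.gcd_add_mul_right_left, Int.neg_gcd]
        exact hgcd
      · unfold pvChild; left
        show (m, n) = (2 * n - (2 * n - m), n)
        rw [Prod.mk.injEq]; exact ⟨by ring, rfl⟩

theorem pv_complete (M : Int) :
    ∀ (k : Nat) (p : Int × Int), p.1.toNat ≤ k → pvValid p.1 p.2 → p.1 ≤ M →
      p ∈ pvCollect M (M + 2).toNat 2 1 := by
  intro k
  induction k with
  | zero =>
    intro p hk hv _
    obtain ⟨h2, -⟩ := hv
    omega
  | succ k ih =>
    intro p hk hv hM
    obtain ⟨pm, pn⟩ := p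
    have h2 : 2 ≤ pm := hv.1
    have hk' : pm.toNat ≤ k + 1 := hk
    have hMp : pm ≤ M := hM
    by_cases hroot : (pm, pn) = (2, 1)
    · rw [hroot]
      exact pv_head_mem M (by omega) (by omega)
    · obtain ⟨hqv, hqlt, hqchild⟩ := pv_parent_spec hv hroot
      have hqlt' : (pvParent (pm, pn)).1 < pm := hqlt
      have hq2 : 2 ≤ (pvParent (pm, pn)).1 := hqv.1
      have hqmem : pvParent (pm, pn) ∈ pvCollect M (M + 2).toNat 2 1 :=
        ih (pvParent (pm, pn)) (by omega) hqv (by omega)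
      exact pv_child_mem M _ 2 1 (by omega) (by omega) (by omega) _ _ hqmem hqchild hMp

theorem pv_mem_collect (M : Int) (p : Int × Int) :
    p ∈ pvCollect M (M + 2).toNat 2 1 ↔ pvValid p.1 p.2 ∧ p.1 ≤ M := by
  constructor
  · exact pv_collect_sound M _ 2 1 (by unfold pvValid; decide) p
  · rintro ⟨hv, hM⟩
    exact pv_complete M p.1.toNat p le_rfl hv hM

-- Python's key-less tuple sort is sorting by the lexicographic order on pairs
theorem pv_sorted2_eq_sorted (xs : List (Int × Int)) :
    PySem.List.sorted2 xs Prod.fst Prod.snd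
      = PySem.List.sorted xs (fun p : Int × Int => toLex p) := by
  have hb : (fun a b : Int × Int =>
        decide (a.1 < b.1) || (!decide (b.1 < a.1) && decide (a.2 < b.2)))
      = (fun a b : Int × Int => decide (toLex a < toLex b)) := by
    funext a b
    rcases lt_trichotomy a.1 b.1 with h | h | h
    · simp [Prod.Lex.toLex_lt_toLex, h]
    · simp [Prod.Lex.toLex_lt_toLex, h]
    · simp [Prod.Lex.toLex_lt_toLex, h, asymm h]
      omega
  have h1 : PySem.List.sorted2 xs Prod.fst Prod.snd
      = List.foldl (fun acc x => PySem.List.insertBy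
          (fun a b : Int × Int =>
            decide (a.1 < b.1) || (!decide (b.1 < a.1) && decide (a.2 < b.2))) x acc) [] xs := rfl
  rw [h1, hb, ← PySem.List.sorted_eq_foldl_insertBy]

-- the sorted, deduplicated tree output IS A's traversal order of the kept pairs
theorem pv_sorted_pairs (M : Int) :
    PySem.List.sorted2 (PySem.Set.ofList (pvCollect M (M + 2).toNat 2 1))
        Prod.fst Prod.snd = pvLA M := by
  rw [pv_sorted2_eq_sorted]
  apply PySem.List.sorted_eq_of_perm_of_pairwise_lt
  · apply List.perm_of_nodup_nodup_toFinset_eq (pv_nodup_LA M) (PySem.Set.nodup_ofList _)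
    ext x
    simp only [List.mem_toFinset, pv_mem_LA, PySem.Set.mem_ofList, pv_mem_collect]
  · exact (pv_pairwise_LA M).imp (fun h => h)

-- the k-range is empty when the primitive already overflows the limit
theorem pv_range_nil {limit high : Int} (hl : 0 ≤ limit) (hh : 0 < high) (h : high > limit) :
    PySem.List.pyRange 1 (PySem.Int.floordiv limit high + 1) 1 = [] := by
  have : PySem.Int.floordiv limit high = 0 := by
    rw [PySem.Int.floordiv_eq_iff_of_pos hh]
    constructor <;> nlinarith
  rw [this]
  exact PySem.List.pyRange_one_eq_nil (by norm_num)

-- ===== VERDICT (by name: the statement is the Claim_ definition above) =====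
theorem generate_pythagorean_adjacency_spec : Claim_equal_generate_pythagorean_adjacency := by
  intro limit _ hpre
  unfold Spec_generate_pythagorean_adjacency
  unfold generate_pythagorean_adjacency generate_pythagorean_adjacency_alt
  simp only [pv_sorted_pairs, pvLA, List.foldl_flatMap, List.foldl_map]
  congr 1
  apply PySem.List.foldl_congr_mem
  intro adj m _
  rw [pv_foldl_skip (fun n => PySem.Int.band (m - n) 1 = 0 ∨ Int.gcd m n ≠ 1)]
  apply PySem.List.foldl_congr_mem
  intro acc n hn
  rw [List.mem_filter, PySem.List.mem_pyRange_one] at hn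
  obtain ⟨⟨hn1, hnm⟩, -⟩ := hn
  have hbpos : 0 < 2 * m * n := by nlinarith
  have hhigh : 0 < max (m * m - n * n) (2 * m * n) := lt_max_of_lt_right hbpos
  by_cases hgt : max (m * m - n * n) (2 * m * n) > limit
  · rw [if_pos hgt, pv_range_nil hpre hhigh hgt]
    simp
  · rw [if_neg hgt]

theorem generate_pythagorean_adjacency_pre_witness :
    Dom_generate_pythagorean_adjacency pvWitness_generate_pythagorean_adjacency ∧
    Pre_generate_pythagorean_adjacency pvWitness_generate_pythagorean_adjacency := by
  constructor <;> decide
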